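-- pv_equiv track=rewrite | github.com/lgweida/sw | sw_web/audit_trail/fix_monitor_wesocket.py | get_message_type
-- ===== SOURCE A (Python) =====
-- def get_message_type(message):
--     """Extract message type from FIX message"""
--     try:
--         # Simple parsing - in real implementation, use proper FIX parser
--         tags = message.split('|')
--         for tag in tags:
--             if tag.startswith('35='):
--                 return tag.split('=')[1]
--     except:
--         return 'UNKNOWN'
--     return 'UNKNOWN'
-- ===== SOURCE B (Python) =====
-- import re
--
-- _TAG35 = re.compile(r'(?:^|\|)35=([^=|]*)')
--
-- def get_message_type(message):
--     """Extract message type from FIX message"""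
--     m = _TAG35.search(message)
--     return m.group(1) if m else 'UNKNOWN'
-- ===== Notes on version B (the rewrite author's own statement) =====
-- stated objective: idiomatic
-- what changed: Replaces the split-on-'|' list build plus loop over tags with a single precompiled regex search (?:^|\|)35=([^=|]*) whose anchor and character class reproduce the startswith('35=') test and the value-up-to-next-'='-or-tag-end extraction.
import Mathlib
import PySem

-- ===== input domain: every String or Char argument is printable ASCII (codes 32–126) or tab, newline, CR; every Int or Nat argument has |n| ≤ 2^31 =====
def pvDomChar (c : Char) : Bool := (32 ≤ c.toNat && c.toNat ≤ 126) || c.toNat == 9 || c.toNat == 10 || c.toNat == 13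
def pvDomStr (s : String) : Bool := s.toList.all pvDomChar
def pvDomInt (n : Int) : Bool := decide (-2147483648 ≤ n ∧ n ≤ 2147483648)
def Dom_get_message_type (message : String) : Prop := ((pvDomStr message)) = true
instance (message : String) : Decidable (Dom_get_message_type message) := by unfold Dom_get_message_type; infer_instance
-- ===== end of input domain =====

-- B replaces A's split-on-'|'-and-loop by a single regex search (ported by hand); same O(n) cost, more idiomatic.


-- ===== PORT A =====
-- the 'for tag in tags' loop; the none-branches are the try/except that returns 'UNKNOWN'
def pvLoopA : List String → String
  | [] => "UNKNOWN"
  | tag :: rest =>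
    if PySem.Str.startswith tag "35=" then
      match PySem.Str.split? tag "=" with
      | some pieces =>
        match PySem.List.pyGet? pieces 1 with
        | some v => v
        | none => "UNKNOWN"   -- IndexError would be caught by the bare except
      | none => "UNKNOWN"     -- unreachable ('=' is a nonempty separator)
    else pvLoopA rest

def get_message_type (message : String) : String :=
  match PySem.Str.split? message "|" with
  | some tags => pvLoopA tags
  | none => "UNKNOWN"         -- unreachable ('|' is a nonempty separator)

-- ===== PORT B =====
-- Source B runs one regex search, re.search(r'(?:^|\|)35=([^=|]*)', message).
-- PySem has no regex, so the search is ported by hand, exactly for this pattern: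
-- the leftmost match is the '^' alternative at position 0 if "35=" starts the string,
-- otherwise the first '|' immediately followed by "35="; group(1) is the run of
-- characters not in {'=','|'} after the match.
def pvPat (c : Char) : Bool := !(c == '=' || c == '|')

def pvFindBar : List Char → Option (List Char)
  | [] => none
  | c :: rest =>
    if c = '|' ∧ ['3', '5', '='].isPrefixOf rest then some (rest.drop 3)
    else pvFindBar rest

def get_message_type_alt (message : String) : String :=
  let cs := message.toList
  let m : Option (List Char) :=
    if ['3', '5', '='].isPrefixOf cs then some (cs.drop 3) else pvFindBar cs
  match m with
  | some rest => String.ofList (rest.takeWhile pvPat)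
  | none => "UNKNOWN"

-- ===== PRECONDITION & SPEC =====
def Spec_get_message_type (message : String) (out : String) : Prop := out = get_message_type_alt message
instance (message : String) (out : String) : Decidable (Spec_get_message_type message out) := by unfold Spec_get_message_type; infer_instance

-- ===== CLAIM (what is proved, stated in full; the proofs are below) =====
def Claim_equal_get_message_type : Prop := ∀ (message : String), Dom_get_message_type message → Spec_get_message_type message (get_message_type message)

-- ===== LEMMAS AND PROOFS =====

-- proof-side spec of Python's str.split(sep) for a one-character separator
def pvMySplit (sep : Char) : List Char → List (List Char)
  | [] => [[]]
  | c :: rest =>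
    if c = sep then [] :: pvMySplit sep rest
    else
      match pvMySplit sep rest with
      | [] => [[c]]            -- unreachable
      | h :: t => (c :: h) :: t

def pvHeadCons (x : List Char) : List (List Char) → List (List Char)
  | [] => [x]
  | h :: t => (x ++ h) :: t

lemma pvMySplit_exists_cons (sep : Char) (l : List Char) :
    ∃ h t, pvMySplit sep l = h :: t := by
  cases l with
  | nil => exact ⟨[], [], rfl⟩
  | cons c rest =>
    by_cases hc : c = sep
    · exact ⟨[], pvMySplit sep rest, by simp [pvMySplit, hc]⟩
    · obtain ⟨h, t, he⟩ := pvMySplit_exists_cons sep rest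
      exact ⟨c :: h, t, by simp [pvMySplit, hc, he]⟩

lemma pvGo_eq (sepc : Char) :
    ∀ (fuel : Nat) (l cur : List Char) (acc : List (List Char)), l.length ≤ fuel →
      PySem.Chars.splitOn.go [sepc] fuel l cur acc
        = acc.reverse ++ pvHeadCons cur.reverse (pvMySplit sepc l) := by
  intro fuel
  induction fuel with
  | zero =>
    intro l cur acc h
    have hl : l = [] := by cases l <;> simp_all
    subst hl
    simp [PySem.Chars.splitOn.go, pvMySplit, pvHeadCons]
  | succ f ih =>
    intro l cur acc h
    cases l with
    | nil => simp [PySem.Chars.splitOn.go, pvMySplit, pvHeadCons]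
    | cons c rest =>
      by_cases hc : c = sepc
      · subst hc
        have : PySem.Chars.splitOn.go [c] (f + 1) (c :: rest) cur acc
            = PySem.Chars.splitOn.go [c] f rest [] (cur.reverse :: acc) := by
          simp [PySem.Chars.splitOn.go, List.isPrefixOf]
        rw [this, ih rest [] (cur.reverse :: acc) (by simp only [List.length_cons] at h; omega)]
        obtain ⟨hh, tt, he⟩ := pvMySplit_exists_cons c rest
        simp [pvMySplit, he, pvHeadCons]
      · have : PySem.Chars.splitOn.go [sepc] (f + 1) (c :: rest) cur acc
            = PySem.Chars.splitOn.go [sepc] f rest (c :: cur) acc := by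
          simp [PySem.Chars.splitOn.go, List.isPrefixOf, Ne.symm hc]
        rw [this, ih rest (c :: cur) acc (by simp only [List.length_cons] at h; omega)]
        obtain ⟨hh, tt, he⟩ := pvMySplit_exists_cons sepc rest
        simp [pvMySplit, hc, he, pvHeadCons]

lemma pvSplitOn_eq (sepc : Char) (l : List Char) :
    PySem.Chars.splitOn l [sepc] = pvMySplit sepc l := by
  obtain ⟨h, t, he⟩ := pvMySplit_exists_cons sepc l
  have := pvGo_eq sepc (l.length + 1) l [] [] (Nat.le_succ _)
  simpa [PySem.Chars.splitOn, he, pvHeadCons] using this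

lemma pvMySplit_head (sep : Char) (l : List Char) :
    ∃ t, pvMySplit sep l = (l.takeWhile (fun c => !(c == sep))) :: t := by
  induction l with
  | nil => exact ⟨[], rfl⟩
  | cons c rest ih =>
    by_cases hc : c = sep
    · exact ⟨pvMySplit sep rest, by simp [pvMySplit, hc, List.takeWhile]⟩
    · obtain ⟨t, ht⟩ := ih
      exact ⟨t, by simp [pvMySplit, hc, ht, List.takeWhile,
        show (c == sep) = false from beq_eq_false_iff_ne.mpr hc]⟩

lemma pvMySplit_noBar {l : List Char} (h : '|' ∉ l) : pvMySplit '|' l = [l] := by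
  induction l with
  | nil => rfl
  | cons c rest ih =>
    have hc : c ≠ '|' := fun e => h (by simp [e])
    have hr : '|' ∉ rest := fun e => h (by simp [e])
    simp [pvMySplit, hc, ih hr]

lemma pvMySplit_append {a : List Char} (h : '|' ∉ a) (r : List Char) :
    pvMySplit '|' (a ++ '|' :: r) = a :: pvMySplit '|' r := by
  induction a with
  | nil => simp [pvMySplit]
  | cons c a' ih =>
    have hc : c ≠ '|' := fun e => h (by simp [e])
    have ha : '|' ∉ a' := fun e => h (by simp [e])
    simp [pvMySplit, hc, ih ha]

lemma pvFindBar_noBar {l : List Char} (h : '|' ∉ l) : pvFindBar l = none := by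
  induction l with
  | nil => rfl
  | cons c rest ih =>
    have hc : c ≠ '|' := fun e => h (by simp [e])
    have hr : '|' ∉ rest := fun e => h (by simp [e])
    simp [pvFindBar, hc, ih hr]

lemma pvFindBar_append {a : List Char} (h : '|' ∉ a) (l : List Char) :
    pvFindBar (a ++ l) = pvFindBar l := by
  induction a with
  | nil => rfl
  | cons c a' ih =>
    have hc : c ≠ '|' := fun e => h (by simp [e])
    have ha : '|' ∉ a' := fun e => h (by simp [e])
    simp [pvFindBar, hc, ih ha]

lemma pvTakeWhile_eq_noBar {l : List Char} (h : '|' ∉ l) :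
    l.takeWhile pvPat = l.takeWhile (fun c => !(c == '=')) := by
  induction l with
  | nil => rfl
  | cons c rest ih =>
    have hc : c ≠ '|' := fun e => h (by simp [e])
    have hr : '|' ∉ rest := fun e => h (by simp [e])
    by_cases he : c = '='
    · simp [List.takeWhile, pvPat, he]
    · simp [List.takeWhile, pvPat, ih hr,
        show (c == '=') = false from beq_eq_false_iff_ne.mpr he,
        show (c == '|') = false from beq_eq_false_iff_ne.mpr hc]

lemma pvTakeWhile_pat_append {a : List Char} (h : '|' ∉ a) (r : List Char) :
    (a ++ '|' :: r).takeWhile pvPat = a.takeWhile pvPat := by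
  induction a with
  | nil => simp [List.takeWhile, pvPat]
  | cons c a' ih =>
    have hc : c ≠ '|' := fun e => h (by simp [e])
    have ha : '|' ∉ a' := fun e => h (by simp [e])
    by_cases hp : pvPat c = true
    · simp [List.takeWhile, hp, ih ha]
    · simp [List.takeWhile, hp]

-- A's loop after moving to List Char
def pvLoopAC : List (List Char) → String
  | [] => "UNKNOWN"
  | t :: rest =>
    if ['3', '5', '='].isPrefixOf t then
      match PySem.List.pyGet? (pvMySplit '=' t) 1 with
      | some v => String.ofList v
      | none => "UNKNOWN"
    else pvLoopAC rest

lemma pvLoopA_eq (ts : List (List Char)) :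
    pvLoopA (ts.map String.ofList) = pvLoopAC ts := by
  induction ts with
  | nil => rfl
  | cons t rest ih =>
    have h35 : ("35=" : String).toList = ['3', '5', '='] := by decide
    have heq : ("=" : String).toList = ['='] := by decide
    by_cases hp : ['3', '5', '='].isPrefixOf t = true
    · obtain ⟨h, tl, he⟩ := pvMySplit_exists_cons '=' t
      cases tl with
      | nil =>
        simp [pvLoopA, pvLoopAC, PySem.Str.startswith_eq, String.toList_ofList, h35,
          PySem.Chars.startswith, hp, PySem.Str.split?, PySem.Chars.split?, heq,
          pvSplitOn_eq, he, PySem.List.pyGet?, PySem.List.pyIdx?]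
      | cons v tl' =>
        simp [pvLoopA, pvLoopAC, PySem.Str.startswith_eq, String.toList_ofList, h35,
          PySem.Chars.startswith, hp, PySem.Str.split?, PySem.Chars.split?, heq,
          pvSplitOn_eq, he, PySem.List.pyGet?, PySem.List.pyIdx?]
    · simp [List.map, pvLoopA, pvLoopAC, PySem.Str.startswith_eq, String.toList_ofList,
        h35, PySem.Chars.startswith, hp, ih]

-- B's body on List Char
def pvScanB (cs : List Char) : String :=
  match (if ['3', '5', '='].isPrefixOf cs then some (cs.drop 3) else pvFindBar cs) with
  | some rest => String.ofList (rest.takeWhile pvPat)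
  | none => "UNKNOWN"

lemma pvAlt_eq (message : String) : get_message_type_alt message = pvScanB message.toList := rfl

lemma pvSplitFirst : ∀ {cs : List Char}, '|' ∈ cs → ∃ a r, cs = a ++ '|' :: r ∧ '|' ∉ a := by
  intro cs h
  induction cs with
  | nil => cases h
  | cons c rest ih =>
    by_cases hc : c = '|'
    · exact ⟨[], rest, by simp [hc], by simp⟩
    · have hm : '|' ∈ rest := by
        rcases List.mem_cons.mp h with h1 | h1
        · exact absurd h1.symm hc
        · exact h1
      obtain ⟨a, r, he, hna⟩ := ih hm
      exact ⟨c :: a, r, by simp [he], by simp [hna, Ne.symm hc]⟩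

lemma pvPrefix_of_append {a r : List Char} (hna : '|' ∉ a)
    (hp : ['3', '5', '='].isPrefixOf (a ++ '|' :: r) = true) :
    ['3', '5', '='].isPrefixOf a = true := by
  match a, hna with
  | [], _ => simp [List.isPrefixOf, show ('3' == '|') = false from by decide] at hp
  | [x], _ => simp [List.isPrefixOf, show ('5' == '|') = false from by decide] at hp
  | [x, y], _ => simp [List.isPrefixOf, show ('=' == '|') = false from by decide] at hp
  | x :: y :: z :: a', _ =>
    simp only [List.cons_append, List.isPrefixOf, Bool.and_eq_true, beq_iff_eq] at hp ⊢
    exact ⟨hp.1, hp.2.1, hp.2.2.1, by simp⟩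

lemma pvValue_eq (t : List Char) (hp : ['3', '5', '='].isPrefixOf t = true) (hnb : '|' ∉ t.drop 3) :
    (match PySem.List.pyGet? (pvMySplit '=' t) 1 with
      | some v => String.ofList v
      | none => "UNKNOWN")
    = String.ofList ((t.drop 3).takeWhile pvPat) := by
  obtain ⟨r, hr⟩ : ∃ r, t = '3' :: '5' :: '=' :: r := by
    obtain ⟨s, hs⟩ := List.isPrefixOf_iff_prefix.mp hp
    exact ⟨s, hs.symm⟩
  subst hr
  obtain ⟨tl, htl⟩ := pvMySplit_head '=' r
  have : pvMySplit '=' ('3' :: '5' :: '=' :: r) = ['3', '5'] :: (r.takeWhile (fun c => !(c == '='))) :: tl := by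
    simp [pvMySplit, htl]
  rw [this]
  simp only [List.drop] at hnb ⊢
  rw [pvTakeWhile_eq_noBar hnb]
  simp [PySem.List.pyGet?, PySem.List.pyIdx?]

lemma pvMain : ∀ (n : Nat) (cs : List Char), cs.length ≤ n →
    pvLoopAC (pvMySplit '|' cs) = pvScanB cs := by
  intro n
  induction n with
  | zero =>
    intro cs h
    have : cs = [] := by cases cs <;> simp_all
    subst this
    rfl
  | succ n ih =>
    intro cs hlen
    by_cases hbar : '|' ∈ cs
    · obtain ⟨a, r, he, hna⟩ := pvSplitFirst hbar
      subst he
      rw [pvMySplit_append hna]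
      by_cases hp : ['3', '5', '='].isPrefixOf (a ++ '|' :: r) = true
      · -- "35=" is a prefix of cs, hence of a (its first 3 chars are not '|')
        have hpa : ['3', '5', '='].isPrefixOf a = true := pvPrefix_of_append hna hp
        have hnb : '|' ∉ a.drop 3 := fun hm => hna (List.mem_of_mem_drop hm)
        have hdrop : (a ++ '|' :: r).drop 3 = a.drop 3 ++ '|' :: r := by
          have h3 : 3 ≤ a.length := by
            have := List.IsPrefix.length_le (List.isPrefixOf_iff_prefix.mp hpa)
            simpa using this
          rw [List.drop_append_of_le_length h3]
        calc pvLoopAC (a :: pvMySplit '|' r)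
            = (match PySem.List.pyGet? (pvMySplit '=' a) 1 with
                | some v => String.ofList v
                | none => "UNKNOWN") := by simp [pvLoopAC, hpa]
          _ = String.ofList ((a.drop 3).takeWhile pvPat) := pvValue_eq a hpa hnb
          _ = pvScanB (a ++ '|' :: r) := by
                simp [pvScanB, hp, hdrop, pvTakeWhile_pat_append hnb]
      · have hpa : ['3', '5', '='].isPrefixOf a = false := by
          cases hpa0 : ['3', '5', '='].isPrefixOf a with
          | false => rfl
          | true =>
            exact absurd (List.isPrefixOf_iff_prefix.mpr
              ((List.isPrefixOf_iff_prefix.mp hpa0).trans (List.prefix_append a ('|' :: r)))) hp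
        have hrlen : r.length ≤ n := by
          simp only [List.length_append, List.length_cons] at hlen
          omega
        calc pvLoopAC (a :: pvMySplit '|' r)
            = pvLoopAC (pvMySplit '|' r) := by simp [pvLoopAC, hpa]
          _ = pvScanB r := ih r hrlen
          _ = pvScanB (a ++ '|' :: r) := by
                by_cases hpr : ['3', '5', '='].isPrefixOf r = true
                · simp [pvScanB, hp, hpr, pvFindBar_append hna, pvFindBar]
                · simp [pvScanB, hp, hpr, pvFindBar_append hna, pvFindBar]
    · rw [pvMySplit_noBar hbar]
      by_cases hp : ['3', '5', '='].isPrefixOf cs = true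
      · have hnb : '|' ∉ cs.drop 3 := fun hm => hbar (List.mem_of_mem_drop hm)
        simp only [pvLoopAC, hp, if_pos, pvScanB]
        rw [pvValue_eq cs hp hnb]
      · simp [pvLoopAC, hp, pvScanB, pvFindBar_noBar hbar]

-- ===== VERDICT (by name: the statement is the Claim_ definition above) =====
theorem get_message_type_spec : Claim_equal_get_message_type := by
  intro message _
  unfold Spec_get_message_type
  have hbar : ("|" : String).toList = ['|'] := by decide
  have hsplit : PySem.Str.split? message "|"
      = some ((pvMySplit '|' message.toList).map String.ofList) := by
    simp [PySem.Str.split?, PySem.Chars.split?, hbar, pvSplitOn_eq]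
  have h1 : get_message_type message
      = pvLoopA ((pvMySplit '|' message.toList).map String.ofList) := by
    unfold get_message_type
    rw [hsplit]
  rw [h1, pvLoopA_eq, pvMain message.toList.length message.toList (le_refl _), pvAlt_eq]
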